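-- pv_equiv track=rewrite | github.com/ChangLabSNU/VaxPress | vaxpress/scoring/folding.py | find_stems
-- ===== SOURCE A (Python) =====
-- def find_stems(structure):
--     stack = []
--     stemgroups = []
--
--     for i, s in enumerate(structure):
--         if s == '(':
--             stack.append(i)
--         elif s == ')':
--             assert len(stack) >= 1
--             peer = stack.pop()
--             if (stemgroups and peer + 1 == stemgroups[-1][0][-1] and
--                     i - 1 == stemgroups[-1][1][-1]):
--                 stemgroups[-1][0].append(peer)
--                 stemgroups[-1][1].append(i)
--             else:
--                 stemgroups.append(([peer], [i]))
--
--     return stemgroups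
-- ===== SOURCE B (Python) =====
-- def find_stems(structure):
--     # pass 1: match parentheses with a stack, emitting (open, close) pairs
--     # in the order the closing brackets are encountered
--     stack = []
--     pairs = []
--     for i, s in enumerate(structure):
--         if s == '(':
--             stack.append(i)
--         elif s == ')':
--             assert len(stack) >= 1
--             pairs.append((stack.pop(), i))
--     # pass 2: split the pair list into maximal runs of adjacent pairs
--     stemgroups = []
--     cur_open = cur_close = None
--     for peer, i in pairs:
--         if cur_open is not None and peer + 1 == cur_open[-1] and i - 1 == cur_close[-1]:
--             cur_open.append(peer)
--             cur_close.append(i)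
--         else:
--             if cur_open is not None:
--                 stemgroups.append((cur_open, cur_close))
--             cur_open, cur_close = [peer], [i]
--     if cur_open is not None:
--         stemgroups.append((cur_open, cur_close))
--     return stemgroups
-- ===== Notes on version B (the rewrite author's own statement) =====
-- stated objective: alternative
-- what changed: B splits A's single interleaved loop into two passes: a stack pass that builds the flat matched-pair list in close order, then a run-splitting pass with local accumulators that groups adjacent pairs into stems, instead of mutating the last stem group in place while scanning.
import Mathlib
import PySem

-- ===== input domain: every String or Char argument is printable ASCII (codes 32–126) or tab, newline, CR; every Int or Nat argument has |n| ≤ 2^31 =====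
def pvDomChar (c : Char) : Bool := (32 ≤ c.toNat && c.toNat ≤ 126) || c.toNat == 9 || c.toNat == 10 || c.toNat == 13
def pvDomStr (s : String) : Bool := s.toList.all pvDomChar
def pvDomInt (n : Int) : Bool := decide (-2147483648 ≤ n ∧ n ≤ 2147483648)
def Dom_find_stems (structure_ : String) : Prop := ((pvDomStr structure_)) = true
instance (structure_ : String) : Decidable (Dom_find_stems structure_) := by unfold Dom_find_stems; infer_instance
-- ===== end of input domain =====

-- B replaces A's single interleaved loop by two passes (stack pair-matching, then
-- run-splitting of the pair list); same values, same cost (objective: alternative).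


-- ===== PORT A =====
-- step for one ')' with popped index `peer` at position `i` (the if/else on stemgroups[-1])
def stepA (sg : List (List Int × List Int)) (peer i : Int) : List (List Int × List Int) :=
  match sg.getLast? with
  | some g =>
    if g.1.getLast? = some (peer + 1) ∧ g.2.getLast? = some (i - 1) then
      sg.dropLast ++ [(g.1 ++ [peer], g.2 ++ [i])]
    else sg ++ [([peer], [i])]
  | none => sg ++ [([peer], [i])]

-- the for-loop of A; on ')' with an empty stack Python's assert raises (outside Pre_), the port skips
def loopA : List Char → Int → List Int → List (List Int × List Int) → List (List Int × List Int)
  | [], _, _, sg => sg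
  | c :: cs, i, stack, sg =>
    if c = '(' then loopA cs (i + 1) (stack ++ [i]) sg
    else if c = ')' then
      match stack.getLast? with
      | some peer => loopA cs (i + 1) stack.dropLast (stepA sg peer i)
      | none => loopA cs (i + 1) stack sg
    else loopA cs (i + 1) stack sg

def find_stems (structure_ : String) : List (List Int × List Int) :=
  loopA structure_.toList 0 [] []

-- ===== PORT B =====
-- pass 1: match parentheses with a stack, emitting (open, close) pairs in close order
-- (on ')' with an empty stack Python's assert raises — outside Pre_ — the port skips)
def pass1B : List Char → Int → List Int → List (Int × Int) → List Int × List (Int × Int)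
  | [], _, stack, pairs => (stack, pairs)
  | c :: cs, i, stack, pairs =>
    if c = '(' then pass1B cs (i + 1) (stack ++ [i]) pairs
    else if c = ')' then
      match stack.getLast? with
      | some peer => pass1B cs (i + 1) stack.dropLast (pairs ++ [(peer, i)])
      | none => pass1B cs (i + 1) stack pairs
    else pass1B cs (i + 1) stack pairs

-- pass 2: split the pair list into maximal runs of adjacent pairs
-- (cur = none ↔ Python's cur_open is None; done is stemgroups so far)
def groupB : List (Int × Int) → List (List Int × List Int) → Option (List Int × List Int) → List (List Int × List Int)
  | [], done, none => done
  | [], done, some cur => done ++ [cur]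
  | (peer, i) :: ps, done, cur =>
    match cur with
    | some c =>
      if c.1.getLast? = some (peer + 1) ∧ c.2.getLast? = some (i - 1) then
        groupB ps done (some (c.1 ++ [peer], c.2 ++ [i]))
      else groupB ps (done ++ [c]) (some ([peer], [i]))
    | none => groupB ps done (some ([peer], [i]))

def find_stems_alt (structure_ : String) : List (List Int × List Int) :=
  groupB (pass1B structure_.toList 0 [] []).2 [] none

-- ===== PRECONDITION & SPEC =====
-- Pre_ excludes exactly the inputs where some prefix has more ')' than '(' — there
-- Python A's `assert len(stack) >= 1` raises AssertionError (B raises there too).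
def Pre_find_stems (structure_ : String) : Prop :=
  ∀ n ∈ List.range (structure_.toList.length + 1),
    (structure_.toList.take n).count ')' ≤ (structure_.toList.take n).count '('

instance (structure_ : String) : Decidable (Pre_find_stems structure_) := by
  unfold Pre_find_stems; infer_instance

def pvWitness_find_stems : String := "((.))()"

def Spec_find_stems (structure_ : String) (out : List (List Int × List Int)) : Prop := out = find_stems_alt structure_
instance (structure_ : String) (out : List (List Int × List Int)) : Decidable (Spec_find_stems structure_ out) := by unfold Spec_find_stems; infer_instance

-- ===== CLAIM (what is proved, stated in full; the proofs are below) =====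
def Claim_equal_find_stems : Prop := ∀ (structure_ : String), Dom_find_stems structure_ → Pre_find_stems structure_ → Spec_find_stems structure_ (find_stems structure_)

-- ===== LEMMAS AND PROOFS =====

-- A's grouping as a fold of stepA over the matched pairs
def groupA (ps : List (Int × Int)) : List (List Int × List Int) :=
  List.foldl (fun sg p => stepA sg p.1 p.2) [] ps

lemma loopA_pass1 : ∀ (cs : List Char) (i : Int) (stack : List Int) (ps : List (Int × Int)),
    loopA cs i stack (groupA ps) = groupA (pass1B cs i stack ps).2 := by
  intro cs
  induction cs with
  | nil => intro i stack ps; simp [loopA, pass1B]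
  | cons c cs ih =>
    intro i stack ps
    by_cases h1 : c = '('
    · simp [loopA, pass1B, h1, ih]
    · by_cases h2 : c = ')'
      · cases hst : stack.getLast? with
        | none => simp [loopA, pass1B, h2, hst, ih]
        | some peer =>
          have : stepA (groupA ps) peer i = groupA (ps ++ [(peer, i)]) := by
            simp [groupA]
          simp [loopA, pass1B, h2, hst, this, ih]
      · simp [loopA, pass1B, h1, h2, ih]

lemma groupA_groupB_aux : ∀ (ps : List (Int × Int)) (done : List (List Int × List Int)) (cur : List Int × List Int),
    List.foldl (fun sg p => stepA sg p.1 p.2) (done ++ [cur]) ps = groupB ps done (some cur) := by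
  intro ps
  induction ps with
  | nil => intro done cur; simp [groupB]
  | cons p ps ih =>
    intro done cur
    obtain ⟨peer, i⟩ := p
    by_cases h : cur.1.getLast? = some (peer + 1) ∧ cur.2.getLast? = some (i - 1)
    · have hs : stepA (done ++ [cur]) peer i = done ++ [(cur.1 ++ [peer], cur.2 ++ [i])] := by
        simp [stepA, h]
      simp only [List.foldl_cons, hs, groupB]
      rw [if_pos h]
      exact ih done (cur.1 ++ [peer], cur.2 ++ [i])
    · have hs : stepA (done ++ [cur]) peer i = (done ++ [cur]) ++ [([peer], [i])] := by
        simp [stepA, h]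
      simp only [List.foldl_cons, hs, groupB]
      rw [if_neg h]
      exact ih (done ++ [cur]) ([peer], [i])

lemma groupA_groupB : ∀ (ps : List (Int × Int)), groupA ps = groupB ps [] none := by
  intro ps
  cases ps with
  | nil => simp [groupA, groupB]
  | cons p ps =>
    obtain ⟨peer, i⟩ := p
    have : stepA [] peer i = [] ++ [([peer], [i])] := by simp [stepA]
    simp only [groupA, List.foldl_cons, this, groupB]
    exact groupA_groupB_aux ps [] ([peer], [i])

-- ===== VERDICT (by name: the statement is the Claim_ definition above) =====
theorem find_stems_spec : Claim_equal_find_stems := by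
  intro s _ _
  show find_stems s = find_stems_alt s
  unfold find_stems find_stems_alt
  exact (loopA_pass1 s.toList 0 [] []).trans (groupA_groupB _)
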